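-- pv_equiv track=rewrite | github.com/shahryarfp/Genetic-Algorithm | Genetic.py | change_chromosome_shape
-- ===== SOURCE A (Python) =====
-- import copy
--
-- def change_chromosome_shape(chromosome_, message):
--     ans = ""
--     chromosome = copy.deepcopy(chromosome_)
--     for i in range(len(message)):
--         if message[i] != ' ':
--             chromosome, popped = chromosome[1:], chromosome[0]
--             ans += popped
--         else:
--             ans += message[i]
--     return ans
-- ===== SOURCE B (Python) =====
-- def change_chromosome_shape(chromosome_, message):
--     pieces = []
--     pos = 0
--     for word in message.split(' '):
--         pieces.append(''.join(chromosome_[pos + k] for k in range(len(word))))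
--         pos += len(word)
--     return ' '.join(pieces)
-- ===== Notes on version B (the rewrite author's own statement) =====
-- stated objective: idiomatic
-- what changed: Replaces the per-character index loop that pops the chromosome's front at every non-space position by split-on-space / per-word indexed extraction / join, tracking a cursor instead of mutating the chromosome.
import Mathlib
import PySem

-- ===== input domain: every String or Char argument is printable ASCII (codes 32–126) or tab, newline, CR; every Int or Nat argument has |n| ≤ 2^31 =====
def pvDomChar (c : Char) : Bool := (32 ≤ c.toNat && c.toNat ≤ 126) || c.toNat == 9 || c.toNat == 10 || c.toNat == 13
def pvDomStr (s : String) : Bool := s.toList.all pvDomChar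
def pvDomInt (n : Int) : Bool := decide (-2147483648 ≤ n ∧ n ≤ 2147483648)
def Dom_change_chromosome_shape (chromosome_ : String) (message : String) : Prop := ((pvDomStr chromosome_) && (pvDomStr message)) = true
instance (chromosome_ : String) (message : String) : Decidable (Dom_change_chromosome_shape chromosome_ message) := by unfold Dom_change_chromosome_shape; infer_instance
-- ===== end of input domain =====

-- B replaces A's per-index loop (which pops the chromosome's front at each non-space
-- character) by split-on-space / per-word indexed extraction / join — idiomatic, same
-- return value on Pre_ (and, like A, an IndexError outside it).

-- ===== PORT A =====
-- per-index loop; state = (ans, chromosome). 'pyGetD … 0 ' '' totalizes Python's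
-- 'chromosome[0]' (IndexError exactly on the inputs Pre_ excludes).
def change_chromosome_shape (chromosome_ : String) (message : String) : String :=
  let msg := message.toList
  let st := (PySem.List.pyRange 0 (PySem.Str.len message) 1).foldl
    (fun (st : List Char × List Char) i =>
      if PySem.List.pyGetD msg i ' ' ≠ ' ' then
        (st.1 ++ [PySem.List.pyGetD st.2 0 ' '], PySem.List.slice st.2 (some 1) none)
      else
        (st.1 ++ [PySem.List.pyGetD msg i ' '], st.2))
    ([], chromosome_.toList)
  String.ofList st.1

-- ===== PORT B =====
-- split on ' '; for each word extract chromosome_[pos+k] for k in range(len(word));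
-- join with ' '. 'pyGetD … ' '' totalizes Python's 'chromosome_[pos + k]'
-- (IndexError exactly on the inputs Pre_ excludes).
def change_chromosome_shape_alt (chromosome_ : String) (message : String) : String :=
  let ch := chromosome_.toList
  let st := (PySem.Chars.splitOn message.toList [' ']).foldl
    (fun (st : List (List Char) × Int) w =>
      (st.1 ++ [(PySem.List.pyRange 0 (w.length : Int) 1).map
          (fun k => PySem.List.pyGetD ch (st.2 + k) ' ')],
       st.2 + (w.length : Int)))
    ([], 0)
  String.ofList (PySem.Chars.join [' '] st.1)

-- ===== PRECONDITION & SPEC =====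
-- Pre_ excludes exactly the inputs where Python A (and B) raises IndexError: more
-- non-space characters in message than characters in chromosome_.
def Pre_change_chromosome_shape (chromosome_ : String) (message : String) : Prop :=
  message.toList.countP (· != ' ') ≤ chromosome_.toList.length
instance (chromosome_ : String) (message : String) : Decidable (Pre_change_chromosome_shape chromosome_ message) := by unfold Pre_change_chromosome_shape; infer_instance

def pvWitness_change_chromosome_shape : String × String := ("abc", "ab c")

def Spec_change_chromosome_shape (chromosome_ : String) (message : String) (out : String) : Prop := out = change_chromosome_shape_alt chromosome_ message
instance (chromosome_ : String) (message : String) (out : String) : Decidable (Spec_change_chromosome_shape chromosome_ message out) := by unfold Spec_change_chromosome_shape; infer_instance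

-- ===== CLAIM (what is proved, stated in full; the proofs are below) =====
def Claim_equal_change_chromosome_shape : Prop := ∀ (chromosome_ : String) (message : String), Dom_change_chromosome_shape chromosome_ message → Pre_change_chromosome_shape chromosome_ message → Spec_change_chromosome_shape chromosome_ message (change_chromosome_shape chromosome_ message)

-- ===== LEMMAS AND PROOFS =====

-- the common value: message with each non-space position replaced by the next chromosome char
def pvWeave : List Char → List Char → List Char
  | [], _ => []
  | c :: ms, ch =>
    if c = ' ' then ' ' :: pvWeave ms ch
    else ch.headD ' ' :: pvWeave ms ch.tail

-- structural form of message.split(' ')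
def pvSplit : List Char → List (List Char)
  | [] => [[]]
  | c :: ms => if c = ' ' then [] :: pvSplit ms else (pvSplit ms).modifyHead (c :: ·)

-- the consecutive slices of the chromosome corresponding to the words
def pvSlices (ch : List Char) : List (List Char) → Nat → List (List Char)
  | [], _ => []
  | w :: ws, p => (ch.drop p).take w.length :: pvSlices ch ws (p + w.length)

-- the per-word indexed pieces B actually builds
def pvPieces (ch : List Char) : List (List Char) → Nat → List (List Char)
  | [], _ => []
  | w :: ws, p =>
    ((List.range w.length).map (fun k => ch.getD (p + k) ' ')) :: pvPieces ch ws (p + w.length)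

lemma pvSplit_ne_nil (ms : List Char) : pvSplit ms ≠ [] := by
  induction ms with
  | nil => simp [pvSplit]
  | cons c ms ih =>
    simp only [pvSplit]
    split_ifs
    · simp
    · cases h : pvSplit ms with
      | nil => exact absurd h ih
      | cons w ws => simp

lemma splitOn_go_eq : ∀ (fuel : Nat) (l cur : List Char) (acc : List (List Char)),
    l.length ≤ fuel →
    PySem.Chars.splitOn.go [' '] fuel l cur acc
      = acc.reverse ++ (pvSplit l).modifyHead (cur.reverse ++ ·) := by
  intro fuel
  induction fuel with
  | zero =>
    intro l cur acc h
    have : l = [] := List.eq_nil_of_length_eq_zero (Nat.le_zero.mp h)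
    subst this
    simp [PySem.Chars.splitOn.go, pvSplit]
  | succ fuel ih =>
    intro l cur acc h
    cases l with
    | nil => simp [PySem.Chars.splitOn.go, pvSplit]
    | cons c rest =>
      simp only [PySem.Chars.splitOn.go]
      by_cases hc : c = ' '
      · subst hc
        have hpre : [' '].isPrefixOf (' ' :: rest) = true := by simp [List.isPrefixOf]
        rw [if_pos hpre]
        simp only [List.length_cons] at h
        rw [ih _ _ _ (by simp; omega)]
        simp only [pvSplit, List.reverse_nil, List.reverse_cons, List.nil_append]
        cases hs : pvSplit rest with
        | nil => exact absurd hs (pvSplit_ne_nil rest)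
        | cons w ws => simp [hs]
      · have hpre : [' '].isPrefixOf (c :: rest) = false := by
          simp [List.isPrefixOf]
          intro h'; exact absurd h'.symm hc
        rw [if_neg (by simp [hpre])]
        simp only [List.length_cons] at h
        rw [ih _ _ _ (by omega)]
        simp only [pvSplit, if_neg hc]
        cases hs : pvSplit rest with
        | nil => exact absurd hs (pvSplit_ne_nil rest)
        | cons w ws => simp

lemma splitOn_eq_pvSplit (ms : List Char) :
    PySem.Chars.splitOn ms [' '] = pvSplit ms := by
  unfold PySem.Chars.splitOn
  rw [splitOn_go_eq _ _ _ _ (by omega)]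
  cases hs : pvSplit ms with
  | nil => exact absurd hs (pvSplit_ne_nil ms)
  | cons w ws => simp

lemma join_cons_head (x : Char) (w : List Char) (ws : List (List Char)) :
    PySem.Chars.join [' '] ((x :: w) :: ws) = x :: PySem.Chars.join [' '] (w :: ws) := by
  cases ws with
  | nil => simp [PySem.Chars.join_singleton]
  | cons q rest => simp [PySem.Chars.join_cons_cons]

-- A's loop computes pvWeave
lemma loopA_eq : ∀ (ms ch ans : List Char),
    (ms.foldl
      (fun (st : List Char × List Char) c =>
        if c ≠ ' ' then
          (st.1 ++ [PySem.List.pyGetD st.2 0 ' '], PySem.List.slice st.2 (some 1) none)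
        else
          (st.1 ++ [c], st.2))
      (ans, ch)).1 = ans ++ pvWeave ms ch := by
  intro ms
  induction ms with
  | nil => intro ch ans; simp [pvWeave]
  | cons c ms ih =>
    intro ch ans
    by_cases hc : c = ' '
    · subst hc
      rw [List.foldl_cons, if_neg (show ¬(' ' ≠ ' ') by simp), ih ch]
      simp [pvWeave]
    · simp only [List.foldl_cons, if_pos hc]
      rw [PySem.List.slice_from_one]
      have hget : PySem.List.pyGetD ch 0 ' ' = ch.headD ' ' := by
        cases ch <;> simp [PySem.List.pyGetD, PySem.List.pyGet?, PySem.List.pyIdx?]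
      rw [hget, ih ch.tail]
      simp [pvWeave, if_neg hc]

-- B's loop computes pvPieces (with the running position)
lemma loopB_eq (ch : List Char) : ∀ (ws : List (List Char)) (acc : List (List Char)) (p : Nat),
    ws.foldl
      (fun (st : List (List Char) × Int) w =>
        (st.1 ++ [(PySem.List.pyRange 0 (w.length : Int) 1).map
            (fun k => PySem.List.pyGetD ch (st.2 + k) ' ')],
         st.2 + (w.length : Int)))
      (acc, (p : Int))
      = (acc ++ pvPieces ch ws p, ((p + (ws.map List.length).sum : Nat) : Int)) := by
  intro ws
  induction ws with
  | nil => intro acc p; simp [pvPieces]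
  | cons w ws ih =>
    intro acc p
    simp only [List.foldl_cons]
    have hpiece : (PySem.List.pyRange 0 (w.length : Int) 1).map
        (fun k => PySem.List.pyGetD ch ((p : Int) + k) ' ')
        = (List.range w.length).map (fun k => ch.getD (p + k) ' ') := by
      rw [PySem.List.pyRange_one]
      simp only [Int.sub_zero, Int.toNat_natCast, List.map_map]
      refine List.map_congr_left ?_
      intro k _
      have hcast : (p : Int) + (0 + (k : Int)) = ((p + k : Nat) : Int) := by push_cast; ring
      simp only [Function.comp, hcast, PySem.List.pyGetD_natCast]
    have hcast : (p : Int) + (w.length : Int) = ((p + w.length : Nat) : Int) := by push_cast; ring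
    rw [hpiece, hcast, ih (acc ++ [(List.range w.length).map (fun k => ch.getD (p + k) ' ')]) (p + w.length)]
    simp [pvPieces]
    ring

-- sum of word lengths of the split = number of non-space characters
lemma wordsum_eq (ms : List Char) :
    ((pvSplit ms).map List.length).sum = ms.countP (· != ' ') := by
  induction ms with
  | nil => simp [pvSplit]
  | cons c ms ih =>
    by_cases hc : c = ' '
    · subst hc; simp [pvSplit, ih]
    · simp only [pvSplit, if_neg hc]
      cases hs : pvSplit ms with
      | nil => exact absurd hs (pvSplit_ne_nil ms)
      | cons w ws =>
        rw [hs] at ih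
        simp only [List.modifyHead_cons, List.map_cons, List.length_cons, List.sum_cons]
        simp only [List.map_cons, List.sum_cons] at ih
        have hcp : (c :: ms).countP (· != ' ') = ms.countP (· != ' ') + 1 := by
          simp [hc]
        omega

-- in range, the indexed pieces are the consecutive slices
lemma pieces_eq_slices (ch : List Char) : ∀ (ws : List (List Char)) (p : Nat),
    p + (ws.map List.length).sum ≤ ch.length →
    pvPieces ch ws p = pvSlices ch ws p := by
  intro ws
  induction ws with
  | nil => intro p _; simp [pvPieces, pvSlices]
  | cons w ws ih =>
    intro p hp
    simp only [List.map_cons, List.sum_cons] at hp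
    simp only [pvPieces, pvSlices]
    congr 1
    · apply List.ext_getElem
      · simp; omega
      · intro i h1 h2
        have hi : i < w.length := by simpa using h1
        have hpi : p + i < ch.length := by omega
        simp [List.getD_eq_getElem?_getD, List.getElem?_eq_getElem hpi]
    · exact ih (p + w.length) (by omega)


-- main bridge: join of the slices = pvWeave, under the precondition
lemma join_slices_eq (ch : List Char) : ∀ (ms : List Char) (p : Nat),
    p + ms.countP (· != ' ') ≤ ch.length →
    PySem.Chars.join [' '] (pvSlices ch (pvSplit ms) p) = pvWeave ms (ch.drop p) := by
  intro ms
  induction ms with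
  | nil =>
    intro p _
    simp [pvSplit, pvSlices, pvWeave, PySem.Chars.join_singleton]
  | cons c ms ih =>
    intro p hp
    by_cases hc : c = ' '
    · subst hc
      have hsplit : pvSplit (' ' :: ms) = [] :: pvSplit ms := by simp [pvSplit]
      have hcount : (' ' :: ms).countP (· != ' ') = ms.countP (· != ' ') := by
        simp
      rw [hcount] at hp
      cases hs : pvSplit ms with
      | nil => exact absurd hs (pvSplit_ne_nil ms)
      | cons w ws =>
        rw [hsplit, hs]
        simp only [pvSlices, List.length_nil, List.take_zero, Nat.add_zero]
        rw [PySem.Chars.join_cons_cons]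
        have := ih p hp
        rw [hs] at this
        simp only [pvSlices] at this
        rw [this]
        simp [pvWeave]
    · have hcount : (c :: ms).countP (· != ' ') = ms.countP (· != ' ') + 1 := by
        simp [hc]
      rw [hcount] at hp
      have hplen : p < ch.length := by omega
      cases hs : pvSplit ms with
      | nil => exact absurd hs (pvSplit_ne_nil ms)
      | cons w ws =>
        simp only [pvSplit, if_neg hc, hs, List.modifyHead_cons, pvSlices, List.length_cons]
        have hdrop : ch.drop p = ch[p] :: ch.drop (p + 1) := List.drop_eq_getElem_cons hplen
        have htake : (ch.drop p).take (w.length + 1) = ch[p] :: (ch.drop (p + 1)).take w.length := by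
          rw [hdrop]; rfl
        rw [htake, join_cons_head]
        have harg : (ch.drop (p + 1)).take w.length :: pvSlices ch ws (p + (w.length + 1))
            = pvSlices ch (w :: ws) (p + 1) := by
          simp only [pvSlices]
          congr 2
          omega
        rw [harg, ← hs, ih (p + 1) (by omega)]
        simp only [pvWeave, if_neg hc, hdrop]
        simp [List.getElem?_eq_getElem hplen]

-- ===== VERDICT (by name: the statement is the Claim_ definition above) =====
theorem change_chromosome_shape_spec : Claim_equal_change_chromosome_shape := by
  intro chromosome_ message _ hpre
  unfold Spec_change_chromosome_shape change_chromosome_shape change_chromosome_shape_alt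
  simp only []
  have hA : (PySem.List.pyRange 0 (PySem.Str.len message) 1).foldl
      (fun (st : List Char × List Char) i =>
        if PySem.List.pyGetD message.toList i ' ' ≠ ' ' then
          (st.1 ++ [PySem.List.pyGetD st.2 0 ' '], PySem.List.slice st.2 (some 1) none)
        else
          (st.1 ++ [PySem.List.pyGetD message.toList i ' '], st.2))
      ([], chromosome_.toList)
      = message.toList.foldl
        (fun (st : List Char × List Char) c =>
          if c ≠ ' ' then
            (st.1 ++ [PySem.List.pyGetD st.2 0 ' '], PySem.List.slice st.2 (some 1) none)
          else
            (st.1 ++ [c], st.2))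
        ([], chromosome_.toList) := by
    rw [PySem.Str.len_eq]
    exact PySem.List.foldl_pyRange_zero_pyGetD' message.toList ' '
      (fun st c =>
        if c ≠ ' ' then
          (st.1 ++ [PySem.List.pyGetD st.2 0 ' '], PySem.List.slice st.2 (some 1) none)
        else
          (st.1 ++ [c], st.2))
      ([], chromosome_.toList)
  rw [hA, loopA_eq]
  rw [splitOn_eq_pvSplit]
  have hB := loopB_eq chromosome_.toList (pvSplit message.toList) [] 0
  simp only [Nat.cast_zero, Nat.zero_add] at hB
  rw [hB]
  simp only [List.nil_append]
  rw [pieces_eq_slices chromosome_.toList (pvSplit message.toList) 0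
    (by rw [wordsum_eq]; simpa using hpre)]
  rw [join_slices_eq chromosome_.toList message.toList 0
    (by simpa using hpre)]
  simp
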